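-- pv_equiv track=rewrite | github.com/getsen/rag-prac | backend/app/chunk/chunk.py | extract_code_blocks_loose
-- ===== SOURCE A (Python) =====
-- def extract_code_blocks_loose(text: str) -> list[str]:
--     """
--     Extract fenced code blocks using a state machine.
--     Tolerates missing closing fences (still returns the block).
--     """
--     blocks: list[str] = []
--     in_fence = False
--     buf: list[str] = []
--
--     for line in text.splitlines():
--         if line.strip().startswith("```"):
--             if not in_fence:
--                 in_fence = True
--                 buf = []
--             else:
--                 # closing fence
--                 blocks.append("\n".join(buf))
--                 buf = []
--                 in_fence = False
--             continue
--
--         if in_fence: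
--             buf.append(line)
--
--     # If unclosed fence, keep what we have
--     if in_fence and buf:
--         blocks.append("\n".join(buf))
--
--     return blocks
-- ===== SOURCE B (Python) =====
-- def extract_code_blocks_loose(text: str) -> list[str]:
--     """
--     Extract fenced code blocks by splitting the lines on fence lines
--     and keeping every other segment (the ones between fences).
--     """
--     segs: list[list[str]] = []
--     cur: list[str] = []
--     for line in text.splitlines():
--         if line.strip().startswith("```"):
--             segs.append(cur)
--             cur = []
--         else:
--             cur.append(line)
--     segs.append(cur)
--
--     inner = segs[1::2]
--     # an unclosed trailing fence with no content after it yields no block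
--     if len(segs) % 2 == 0 and not inner[-1]:
--         inner.pop()
--     return ["\n".join(seg) for seg in inner]
-- ===== Notes on version B (the rewrite author's own statement) =====
-- stated objective: alternative
-- what changed: B replaces A's boolean in-fence state machine (conditional buffering, emit-on-close, trailing-buffer fixup) by splitting the lines into segments at every fence line and then joining every other segment, dropping only an empty unclosed tail.
import Mathlib
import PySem

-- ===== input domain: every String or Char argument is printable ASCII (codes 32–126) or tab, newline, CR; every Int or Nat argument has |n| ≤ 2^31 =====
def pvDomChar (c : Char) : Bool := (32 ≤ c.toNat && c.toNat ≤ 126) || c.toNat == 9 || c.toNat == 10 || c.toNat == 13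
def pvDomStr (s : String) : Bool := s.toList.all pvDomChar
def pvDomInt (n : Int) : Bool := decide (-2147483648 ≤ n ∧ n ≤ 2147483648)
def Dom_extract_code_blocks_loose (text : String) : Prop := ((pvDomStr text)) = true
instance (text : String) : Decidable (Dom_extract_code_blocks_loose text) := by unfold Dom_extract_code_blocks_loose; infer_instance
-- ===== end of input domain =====

-- B splits the lines on fence lines and keeps every other segment instead of running A's
-- boolean state machine; same cost, simpler decomposition (objective: alternative).

-- ===== PORT A =====
-- shared helper: line.strip().startswith("```")
def pvFence (line : String) : Bool := PySem.Str.startswith (PySem.Str.strip line) "```"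

-- the body of A's for-loop, state = (blocks, in_fence, buf)
def pvAStep (st : List String × Bool × List String) (line : String) : List String × Bool × List String :=
  if pvFence line then
    if !st.2.1 then (st.1, true, ([] : List String))
    else (st.1 ++ [PySem.Str.join "\n" st.2.2], false, [])
  else if st.2.1 then (st.1, st.2.1, st.2.2 ++ [line]) else st

def extract_code_blocks_loose (text : String) : List String :=
  let st := (PySem.Str.splitlines text).foldl pvAStep ([], false, [])
  if st.2.1 && !st.2.2.isEmpty then st.1 ++ [PySem.Str.join "\n" st.2.2] else st.1

-- ===== PORT B =====
-- the body of B's for-loop, state = (segs, cur)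
def pvBStep (st : List (List String) × List String) (line : String) : List (List String) × List String :=
  if pvFence line then (st.1 ++ [st.2], ([] : List String)) else (st.1, st.2 ++ [line])

def extract_code_blocks_loose_alt (text : String) : List String :=
  let st := (PySem.Str.splitlines text).foldl pvBStep ([], [])
  let segs := st.1 ++ [st.2]
  let inner := (PySem.List.slice? segs (some 1) none 2).getD []   -- segs[1::2]; step ≠ 0, so always `some`
  let inner := if segs.length % 2 == 0 && inner.getLast! == ([] : List String)
               then inner.dropLast else inner
  inner.map (fun seg => PySem.Str.join "\n" seg)

-- ===== PRECONDITION & SPEC =====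
def Spec_extract_code_blocks_loose (text : String) (out : List String) : Prop := out = extract_code_blocks_loose_alt text
instance (text : String) (out : List String) : Decidable (Spec_extract_code_blocks_loose text out) := by unfold Spec_extract_code_blocks_loose; infer_instance

-- ===== CLAIM (what is proved, stated in full; the proofs are below) =====
def Claim_equal_extract_code_blocks_loose : Prop := ∀ (text : String), Dom_extract_code_blocks_loose text → Spec_extract_code_blocks_loose text (extract_code_blocks_loose text)

-- ===== LEMMAS AND PROOFS =====

-- elements at odd positions: xs[1::2]
def pvOddSlice {α : Type} : List α → List α
  | [] => []
  | [_] => []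
  | _ :: y :: r => y :: pvOddSlice r

theorem pvOddSlice_append {α : Type} (S : List α) (c : α) :
    pvOddSlice (S ++ [c]) = if S.length % 2 = 1 then pvOddSlice S ++ [c] else pvOddSlice S := by
  induction S using pvOddSlice.induct with
  | case1 => simp [pvOddSlice]
  | case2 x => simp [pvOddSlice]
  | case3 x y r ih =>
      simp only [List.cons_append, pvOddSlice, ih, List.length_cons]
      have hmod : (r.length + 1 + 1) % 2 = r.length % 2 := by omega
      rw [hmod]
      split_ifs <;> rfl

theorem pvFilterMap_odd {α : Type} (xs : List α) :
    List.filterMap (fun (k : Nat) => xs[(1 + 2 * (k : Int)).toNat]?) (List.range (xs.length / 2)) =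
      pvOddSlice xs := by
  induction xs using pvOddSlice.induct with
  | case1 => simp [pvOddSlice]
  | case2 x => simp [pvOddSlice]
  | case3 x y r ih =>
      have hlen : (x :: y :: r).length / 2 = r.length / 2 + 1 := by simp; omega
      rw [hlen, List.range_succ_eq_map, List.filterMap_cons, List.filterMap_map]
      have h0 : (1 + 2 * ((0 : Nat) : Int)).toNat = 1 := by decide
      have hf : ∀ k : Nat, ((fun (k : Nat) => (x :: y :: r)[(1 + 2 * (k : Int)).toNat]?) ∘ Nat.succ) k
          = r[(1 + 2 * (k : Int)).toNat]? := by
        intro k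
        have h2 : (1 + 2 * ((k : Int) + 1)).toNat = ((1 + 2 * (k : Int)).toNat + 1) + 1 := by
          omega
        simp only [Function.comp, Nat.succ_eq_add_one, Nat.cast_add, Nat.cast_one, h2,
          List.getElem?_cons_succ]
      simp only [h0]
      rw [List.filterMap_congr (fun k _ => hf k)]
      simp [pvOddSlice, ih]

theorem pvSlice?_odd {α : Type} (xs : List α) :
    PySem.List.slice? xs (some 1) none 2 = some (pvOddSlice xs) := by
  match xs with
  | [] => simp [PySem.List.slice?, PySem.List.sliceIndices, pvOddSlice]
  | [x] => simp [PySem.List.slice?, PySem.List.sliceIndices, pvOddSlice]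
  | x :: y :: r =>
      have hlen : ((x :: y :: r).length : Int) = (r.length : Int) + 2 := by push_cast [List.length]; ring
      simp only [PySem.List.slice?, PySem.List.sliceIndices]
      norm_num
      have hmin : min (1:Int) ((r.length:Int)+1+1) = 1 := by omega
      rw [hmin]
      have hcnt : ((((r.length:Int) + 1 + 1) - 1 + 2 - 1) / 2).toNat = (x::y::r).length / 2 := by
        simp only [List.length_cons]
        omega
      rw [hcnt]
      exact pvFilterMap_odd (x :: y :: r)

-- the A-state determined by a B-state (the closed blocks are the odd segments)
def pvAbs (st : List (List String) × List String) : List String × Bool × List String :=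
  ((pvOddSlice st.1).map (PySem.Str.join "\n"), st.1.length % 2 == 1,
   if st.1.length % 2 == 1 then st.2 else [])

theorem pvStep_comm (st : List (List String) × List String) (line : String) :
    pvAStep (pvAbs st) line = pvAbs (pvBStep st line) := by
  obtain ⟨S, c⟩ := st
  by_cases hf : pvFence line
  · by_cases hp : S.length % 2 = 1 <;>
      simp [pvAStep, pvBStep, pvAbs, hf, hp, pvOddSlice_append, Nat.add_mod] <;> omega
  · by_cases hp : S.length % 2 = 1 <;> simp [pvAStep, pvBStep, pvAbs, hf, hp]

theorem pvFold_comm (lines : List String) (st : List (List String) × List String) :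
    lines.foldl pvAStep (pvAbs st) = pvAbs (lines.foldl pvBStep st) := by
  induction lines generalizing st with
  | nil => rfl
  | cons l rest ih => simp only [List.foldl_cons, pvStep_comm, ih]

-- ===== VERDICT (by name: the statement is the Claim_ definition above) =====
theorem extract_code_blocks_loose_spec : Claim_equal_extract_code_blocks_loose := by
  intro text _
  unfold Spec_extract_code_blocks_loose extract_code_blocks_loose extract_code_blocks_loose_alt
  have h := pvFold_comm (PySem.Str.splitlines text) ([], [])
  have h0 : pvAbs ([], []) = (([] : List String), false, ([] : List String)) := by rfl
  rw [h0] at h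
  rw [h]
  obtain ⟨S, c⟩ := (PySem.Str.splitlines text).foldl pvBStep ([], [])
  simp only [pvAbs, pvSlice?_odd, Option.getD_some, pvOddSlice_append]
  by_cases hp : S.length % 2 = 1
  · have h1 : (S.length + 1) % 2 = 0 := by omega
    by_cases hc : c = []
    · simp [hp, hc, h1]
    · simp [hp, hc, h1]
  · have h1 : ¬ (S.length + 1) % 2 = 0 := by omega
    simp [hp, h1]
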